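-- pv_equiv track=rewrite | github.com/lion137/test | decimalrunner.py | _extract_update_key
-- ===== SOURCE A (Python) =====
-- def _extract_update_key(test_name, value, data):
--     def is_exact_match(name, key):
--         index = key.find("test_")
--         return name == key[index:]
--     def get_key(value, data):
--         for k, v in data.items():
--             if v == value:
--                 return k
--     test_items = {k: v for k, v in data.items() if test_name in k and is_exact_match(test_name, k)}
--     return get_key(value, test_items)
-- ===== SOURCE B (Python) =====
-- def _extract_update_key(test_name, value, data):
--     for k, v in data.items():
--         if test_name in k and test_name == k[k.find("test_"):] and v == value:
--             return k
--     return None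
-- ===== Notes on version B (the rewrite author's own statement) =====
-- stated objective: simpler
-- what changed: Replaces A's two-phase structure (build a filtered intermediate dict, then a separate get_key scan over it) with one single pass over data.items() that checks the substring test, the find('test_') suffix test and the value in the same loop and returns the first matching key.
import Mathlib
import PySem

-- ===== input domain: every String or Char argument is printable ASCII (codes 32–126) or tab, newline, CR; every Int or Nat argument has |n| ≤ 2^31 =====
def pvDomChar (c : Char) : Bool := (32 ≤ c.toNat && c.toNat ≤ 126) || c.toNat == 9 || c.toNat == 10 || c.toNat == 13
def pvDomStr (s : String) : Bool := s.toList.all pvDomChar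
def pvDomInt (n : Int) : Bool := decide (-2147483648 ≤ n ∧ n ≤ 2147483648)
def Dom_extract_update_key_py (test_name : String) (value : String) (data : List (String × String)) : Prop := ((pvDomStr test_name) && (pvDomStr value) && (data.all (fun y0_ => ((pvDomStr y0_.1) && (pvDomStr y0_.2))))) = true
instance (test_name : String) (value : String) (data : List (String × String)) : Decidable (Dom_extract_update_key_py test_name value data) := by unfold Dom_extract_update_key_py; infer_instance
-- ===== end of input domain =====

-- B fuses A's two phases (filtered intermediate dict, then a get_key scan over it) into one
-- single pass over data.items(); objective: simpler. Return value only; no mutation involved.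
-- `data` is a Python dict: both ports model the call-boundary list→dict conversion with
-- PySem.Dict.ofList before iterating, exactly as CPython's dict(...).items() would yield.

-- ===== PORT A =====
-- is_exact_match(name, key): index = key.find("test_"); name == key[index:]
def euk_is_exact_match (name : String) (key : String) : Bool :=
  let index := PySem.Str.find key "test_"
  name == PySem.Str.slice key (some index) none

-- get_key(value, data): first key whose value equals `value`, else None
def euk_get_key (value : String) (items : List (String × String)) : Option String :=
  match items with
  | [] => none
  | (k, v) :: rest => if v == value then some k else euk_get_key value rest

def extract_update_key_py (test_name : String) (value : String) (data : List (String × String)) : Option String :=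
  let test_items : PySem.Dict String String :=
    PySem.Dict.ofList (((PySem.Dict.ofList data).items).filter
      (fun kv => PySem.Str.isIn test_name kv.1 && euk_is_exact_match test_name kv.1))
  euk_get_key value test_items.items

-- ===== PORT B =====
-- single pass: return k on the first (k, v) with all three tests true
def euk_scan (test_name : String) (value : String) (items : List (String × String)) : Option String :=
  match items with
  | [] => none
  | (k, v) :: rest =>
    if PySem.Str.isIn test_name k
        && (test_name == PySem.Str.slice k (some (PySem.Str.find k "test_")) none)
        && v == value then
      some k
    else euk_scan test_name value rest

def extract_update_key_py_alt (test_name : String) (value : String) (data : List (String × String)) : Option String :=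
  euk_scan test_name value ((PySem.Dict.ofList data).items)

-- ===== PRECONDITION & SPEC =====
def Spec_extract_update_key_py (test_name : String) (value : String) (data : List (String × String)) (out : Option String) : Prop := out = extract_update_key_py_alt test_name value data
instance (test_name : String) (value : String) (data : List (String × String)) (out : Option String) : Decidable (Spec_extract_update_key_py test_name value data out) := by unfold Spec_extract_update_key_py; infer_instance

-- ===== CLAIM (what is proved, stated in full; the proofs are below) =====
def Claim_equal_extract_update_key_py : Prop := ∀ (test_name : String) (value : String) (data : List (String × String)), Dom_extract_update_key_py test_name value data → Spec_extract_update_key_py test_name value data (extract_update_key_py test_name value data)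

-- ===== LEMMAS AND PROOFS =====

-- ofList on a list whose keys are already distinct keeps it unchanged
theorem euk_items_ofList_of_nodup {κ ν : Type} [BEq κ] [LawfulBEq κ]
    (M : List (κ × ν)) (h : (M.map Prod.fst).Nodup) :
    (PySem.Dict.ofList M).items = M := by
  have := PySem.Dict.items_foldl_insert_fresh M Prod.fst Prod.snd PySem.Dict.empty
    (fun a _ => PySem.Dict.contains_empty _) h
  simpa [PySem.Dict.ofList, PySem.Dict.update] using this

-- fusing the filter with the value scan
theorem euk_get_key_filter_eq_scan (test_name value : String) (L : List (String × String)) :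
    euk_get_key value (L.filter
      (fun kv => PySem.Str.isIn test_name kv.1 && euk_is_exact_match test_name kv.1))
      = euk_scan test_name value L := by
  induction L with
  | nil => rfl
  | cons kv rest ih =>
    obtain ⟨k, v⟩ := kv
    simp only [List.filter_cons, euk_scan, euk_is_exact_match]
    split_ifs with h hv hv
    · simp only [Bool.and_eq_true, beq_iff_eq] at hv
      simp [euk_get_key, hv.2]
    · have hvv : (v == value) = false := by
        cases hc : (v == value)
        · rfl
        · exact absurd (by rw [hc, Bool.and_true]; exact h) hv
      simpa [euk_get_key, hvv, euk_is_exact_match] using ih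
    · simp only [Bool.and_eq_true] at hv
      simp only [Bool.and_eq_true, not_and] at h
      exact absurd hv.1.2 (h hv.1.1)
    · simpa [euk_is_exact_match] using ih

-- ===== VERDICT (by name: the statement is the Claim_ definition above) =====
theorem extract_update_key_py_spec : Claim_equal_extract_update_key_py := by
  intro test_name value data _
  unfold Spec_extract_update_key_py extract_update_key_py extract_update_key_py_alt
  have hnd : (((PySem.Dict.ofList data).items).map Prod.fst).Nodup := by
    simpa [PySem.Dict.keys] using PySem.Dict.nodup_keys_ofList (κ := String) (ν := String) data
  have hsub : ((((PySem.Dict.ofList data).items).filter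
      (fun kv => PySem.Str.isIn test_name kv.1 && euk_is_exact_match test_name kv.1)).map Prod.fst).Nodup :=
    hnd.sublist (List.filter_sublist.map Prod.fst)
  simp only [euk_items_ofList_of_nodup _ hsub, euk_get_key_filter_eq_scan]
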